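-- pv_equiv track=rewrite | github.com/gabrielegrillo/Fondamenti1-Unical | R2.py | checkequalhalf
-- ===== SOURCE A (Python) =====
-- def checkequalhalf(start,end,list):
--     if (end+1 == len(list)):
--         if (list[start] == list[end]):
--             return "SI"
--         else:
--             return "NO"
--     else:
--         if (list[start] == list[end]):
--             return checkequalhalf(start+1,end+1,list)
--         else:
--             return "NO"
-- ===== SOURCE B (Python) =====
-- def checkequalhalf(start, end, list):
--     k = 0
--     while end + k + 1 != len(list):
--         if list[start + k] != list[end + k]:
--             return "NO"
--         k += 1
--     return "SI" if list[start + k] == list[end + k] else "NO"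
-- ===== Notes on version B (the rewrite author's own statement) =====
-- stated objective: alternative
-- what changed: Replaces A's tail recursion on two moving indices with an iterative while-loop over a single offset counter k, comparing list[start+k] with list[end+k] from the fixed base indices.
-- outside the precondition, e.g. on checkequalhalf(1, 0, [1, 2]): A returns 'NO', B returns 'NO'
import Mathlib
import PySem

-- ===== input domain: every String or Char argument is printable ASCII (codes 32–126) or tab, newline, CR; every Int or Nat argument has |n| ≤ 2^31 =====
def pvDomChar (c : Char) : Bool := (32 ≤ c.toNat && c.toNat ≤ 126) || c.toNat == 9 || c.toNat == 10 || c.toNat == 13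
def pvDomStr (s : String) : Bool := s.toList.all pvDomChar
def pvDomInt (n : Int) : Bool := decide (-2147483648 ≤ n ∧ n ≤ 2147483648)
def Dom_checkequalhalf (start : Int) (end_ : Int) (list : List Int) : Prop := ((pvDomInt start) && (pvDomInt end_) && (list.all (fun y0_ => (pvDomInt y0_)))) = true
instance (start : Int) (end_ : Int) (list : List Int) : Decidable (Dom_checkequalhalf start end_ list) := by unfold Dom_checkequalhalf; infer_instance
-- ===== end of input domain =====

-- B replaces A's two-moving-index tail recursion by an iterative while-loop over a
-- single offset counter k from the fixed base indices; objective: alternative.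

-- ===== PORT A =====
-- fueled transliteration of A's recursion; pyGet? none (= IndexError) returns "" (outside Pre_)
def checkequalhalfGo (fuel : Nat) (start : Int) (end_ : Int) (list : List Int) : String :=
  match fuel with
  | 0 => ""
  | f + 1 =>
    if end_ + 1 = (list.length : Int) then
      match PySem.List.pyGet? list start, PySem.List.pyGet? list end_ with
      | some a, some b => if a = b then "SI" else "NO"
      | _, _ => ""
    else
      match PySem.List.pyGet? list start, PySem.List.pyGet? list end_ with
      | some a, some b =>
        if a = b then checkequalhalfGo f (start + 1) (end_ + 1) list else "NO"
      | _, _ => ""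

def checkequalhalf (start : Int) (end_ : Int) (list : List Int) : String :=
  checkequalhalfGo (list.length + ((list.length : Int) - end_).toNat + 1) start end_ list

-- ===== PORT B =====
-- 'while end + k + 1 != len(list)' as fuel recursion on the counter k;
-- pyGet? none (= IndexError) returns "" (outside Pre_)
def altGo (fuel : Nat) (start : Int) (end_ : Int) (list : List Int) (k : Int) : String :=
  match fuel with
  | 0 => ""
  | f + 1 =>
    if end_ + k + 1 ≠ (list.length : Int) then
      match PySem.List.pyGet? list (start + k), PySem.List.pyGet? list (end_ + k) with
      | some a, some b => if a ≠ b then "NO" else altGo f start end_ list (k + 1)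
      | _, _ => ""
    else
      match PySem.List.pyGet? list (start + k), PySem.List.pyGet? list (end_ + k) with
      | some a, some b => if a = b then "SI" else "NO"
      | _, _ => ""

def checkequalhalf_alt (start : Int) (end_ : Int) (list : List Int) : String :=
  altGo (((list.length : Int) - end_).toNat + list.length + 1) start end_ list 0

-- ===== PRECONDITION & SPEC =====
-- Pre_ requires -len ≤ start ≤ end < len, the index range on which A is guaranteed to
-- terminate without IndexError; outside it A raises, except when an early mismatch
-- short-circuits to "NO" first — a value-dependent accident (B returns "NO" there too).
def Pre_checkequalhalf (start : Int) (end_ : Int) (list : List Int) : Prop :=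
  -(list.length : Int) ≤ start ∧ start ≤ end_ ∧ end_ < (list.length : Int)
instance (start : Int) (end_ : Int) (list : List Int) : Decidable (Pre_checkequalhalf start end_ list) := by unfold Pre_checkequalhalf; infer_instance

def pvWitness_checkequalhalf : Int × Int × List Int := (0, 1, [1, 1])

def Spec_checkequalhalf (start : Int) (end_ : Int) (list : List Int) (out : String) : Prop := out = checkequalhalf_alt start end_ list
instance (start : Int) (end_ : Int) (list : List Int) (out : String) : Decidable (Spec_checkequalhalf start end_ list out) := by unfold Spec_checkequalhalf; infer_instance

-- ===== CLAIM (what is proved, stated in full; the proofs are below) =====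
def Claim_equal_checkequalhalf : Prop := ∀ (start : Int) (end_ : Int) (list : List Int), Dom_checkequalhalf start end_ list → Pre_checkequalhalf start end_ list → Spec_checkequalhalf start end_ list (checkequalhalf start end_ list)

-- ===== LEMMAS AND PROOFS =====

-- the per-offset mismatch test both ports compute (proof-only helper)
def altMismatch (start : Int) (end_ : Int) (list : List Int) (k : Int) : Bool :=
  match PySem.List.pyGet? list (start + k), PySem.List.pyGet? list (end_ + k) with
  | some a, some b => a != b
  | _, _ => true

lemma pyGet?_isSome_of_inRange (list : List Int) (i : Int)
    (h1 : -(list.length : Int) ≤ i) (h2 : i < (list.length : Int)) :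
    ∃ a, PySem.List.pyGet? list i = some a := by
  cases hx : PySem.List.pyGet? list i with
  | some a => exact ⟨a, rfl⟩
  | none =>
    rw [PySem.List.pyGet?_eq_none_iff] at hx
    exact absurd (by unfold PySem.Raise.InRange; omega) hx

-- B's loop at counter j computes the same any() over the tail range [j, len-end0).
lemma alt_any (list : List Int) (start0 end0 : Int)
    (hs : -(list.length : Int) ≤ start0) (hse : start0 ≤ end0) :
    ∀ (fuel : Nat) (j : Int), 0 ≤ j → end0 + j < (list.length : Int) →
    ((list.length : Int) - end0 - j).toNat ≤ fuel →
    altGo fuel start0 end0 list j =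
      (if (PySem.List.pyRange j ((list.length : Int) - end0) 1).any
          (altMismatch start0 end0 list) then "NO" else "SI") := by
  intro fuel
  induction fuel with
  | zero => intro j hj hjn hf; omega
  | succ f ih =>
    intro j hj hjn hf
    obtain ⟨a, ha⟩ := pyGet?_isSome_of_inRange list (start0 + j) (by omega) (by omega)
    obtain ⟨b, hb⟩ := pyGet?_isSome_of_inRange list (end0 + j) (by omega) (by omega)
    have hmis : altMismatch start0 end0 list j = (a != b) := by
      unfold altMismatch; rw [ha, hb]
    by_cases hlast : end0 + j + 1 = (list.length : Int)
    · have hone : (list.length : Int) - end0 = j + 1 := by omega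
      rw [altGo, if_neg (by omega), ha, hb, hone, PySem.List.pyRange_one_singleton]
      by_cases hab : a = b <;> simp [hab, hmis]
    · have hcons : PySem.List.pyRange j ((list.length : Int) - end0) 1 =
          j :: PySem.List.pyRange (j + 1) ((list.length : Int) - end0) 1 :=
        PySem.List.pyRange_one_cons (by omega)
      rw [altGo, if_pos (by omega), ha, hb, hcons, List.any_cons, hmis]
      by_cases hab : a = b
      · rw [ih (j + 1) (by omega) (by omega) (by omega)]
        subst hab
        rw [bne_self_eq_false, Bool.false_or]
        simp
      · simp [hab]

-- A's recursion at offset j computes the same any() over the tail range [j, len-end0).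
lemma go_any (list : List Int) (start0 end0 : Int)
    (hs : -(list.length : Int) ≤ start0) (hse : start0 ≤ end0) :
    ∀ (fuel : Nat) (j : Int), 0 ≤ j → end0 + j < (list.length : Int) →
    ((list.length : Int) - end0 - j).toNat ≤ fuel →
    checkequalhalfGo fuel (start0 + j) (end0 + j) list =
      (if (PySem.List.pyRange j ((list.length : Int) - end0) 1).any
          (altMismatch start0 end0 list) then "NO" else "SI") := by
  intro fuel
  induction fuel with
  | zero => intro j hj hjn hf; omega
  | succ f ih =>
    intro j hj hjn hf
    obtain ⟨a, ha⟩ := pyGet?_isSome_of_inRange list (start0 + j) (by omega) (by omega)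
    obtain ⟨b, hb⟩ := pyGet?_isSome_of_inRange list (end0 + j) (by omega) (by omega)
    have hmis : altMismatch start0 end0 list j = (a != b) := by
      unfold altMismatch; rw [ha, hb]
    by_cases hlast : end0 + j + 1 = (list.length : Int)
    · have hone : (list.length : Int) - end0 = j + 1 := by omega
      rw [checkequalhalfGo, if_pos (by omega), ha, hb, hone,
        PySem.List.pyRange_one_singleton]
      by_cases hab : a = b <;> simp [hab, hmis]
    · have hcons : PySem.List.pyRange j ((list.length : Int) - end0) 1 =
          j :: PySem.List.pyRange (j + 1) ((list.length : Int) - end0) 1 :=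
        PySem.List.pyRange_one_cons (by omega)
      rw [checkequalhalfGo, if_neg (by omega), ha, hb, hcons, List.any_cons, hmis]
      by_cases hab : a = b
      · have h1 : start0 + j + 1 = start0 + (j + 1) := by ring
        have h2 : end0 + j + 1 = end0 + (j + 1) := by ring
        rw [h1, h2, ih (j + 1) (by omega) (by omega) (by omega)]
        subst hab
        rw [bne_self_eq_false, Bool.false_or]
        simp
      · simp [hab]

-- ===== VERDICT (by name: the statement is the Claim_ definition above) =====
theorem checkequalhalf_spec : Claim_equal_checkequalhalf := by
  intro start end_ list _ hpre
  obtain ⟨h0, hse, hel⟩ := hpre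
  unfold Spec_checkequalhalf checkequalhalf checkequalhalf_alt
  have hA := go_any list start end_ h0 hse
    (list.length + ((list.length : Int) - end_).toNat + 1) 0 le_rfl
    (by omega) (by omega)
  have hB := alt_any list start end_ h0 hse
    (((list.length : Int) - end_).toNat + list.length + 1) 0 le_rfl
    (by omega) (by omega)
  rw [hB]
  simpa using hA
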